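-- pv_equiv track=rewrite | github.com/YJL33/LeetCode | current_session/362.py | findT2
-- ===== SOURCE A (Python) =====
-- def findT2(t1, ts):
--     l, r = 0, len(ts)-1
--     while l < r:
--         m = l + (r-l)//2
--         if ts[m] >= t1-300:
--             r = m
--         else:
--             l = m+1
--     return l
-- ===== SOURCE B (Python) =====
-- def findT2(t1, ts):
--     key = t1 - 300
--     def go(l, n):
--         if n <= 0:
--             return l
--         half = n // 2
--         if ts[l + half] >= key:
--             return go(l, half)
--         return go(l + half + 1, n - half - 1)
--     return go(0, len(ts) - 1)
-- ===== Notes on version B (the rewrite author's own statement) =====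
-- stated objective: alternative
-- what changed: A's two-pointer while loop over mutable (l, r) is replaced by a recursive length-based binary search whose state is (left index, remaining count); the right pointer disappears and the recursion shrinks the count (half / n-half-1) instead of moving r.
import Mathlib
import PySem

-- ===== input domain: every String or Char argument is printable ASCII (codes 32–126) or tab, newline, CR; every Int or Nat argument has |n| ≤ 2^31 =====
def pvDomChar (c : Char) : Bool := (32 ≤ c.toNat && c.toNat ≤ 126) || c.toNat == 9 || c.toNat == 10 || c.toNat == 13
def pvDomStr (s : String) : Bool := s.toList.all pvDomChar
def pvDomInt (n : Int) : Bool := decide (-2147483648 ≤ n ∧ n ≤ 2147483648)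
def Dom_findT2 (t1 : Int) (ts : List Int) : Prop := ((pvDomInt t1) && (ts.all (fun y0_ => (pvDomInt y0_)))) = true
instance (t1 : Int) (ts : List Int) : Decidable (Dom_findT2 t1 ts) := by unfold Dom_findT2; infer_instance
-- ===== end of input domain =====

-- B replaces A's two-pointer (l, r) loop by a recursive length-based binary search over
-- (left index, remaining count); alternative decomposition, same cost.
-- ===== PORT A =====
-- A's while-loop, transliterated as recursion on the loop state (l, r); ts[m] is always
-- in range when the loop body runs (0 ≤ l ≤ m < r ≤ len-1), so pyGetD's default is never used.
def findT2Loop (t1 : Int) (ts : List Int) (l r : Int) : Int :=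
  if _h : l < r then
    let m := l + PySem.Int.floordiv (r - l) 2
    if PySem.List.pyGetD ts m 0 ≥ t1 - 300 then
      findT2Loop t1 ts l m
    else
      findT2Loop t1 ts (m + 1) r
  else l
termination_by (r - l).toNat
decreasing_by
  · rw [PySem.Int.floordiv_eq_ediv_of_pos (by norm_num : (0:Int) < 2)]
    omega
  · rw [PySem.Int.floordiv_eq_ediv_of_pos (by norm_num : (0:Int) < 2)]
    omega

def findT2 (t1 : Int) (ts : List Int) : Int :=
  findT2Loop t1 ts 0 (ts.length - 1)

-- ===== PORT B =====
-- B's recursive helper go(l, n): n is the remaining count, a Nat here (go is only ever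
-- called with n ≥ 0; Python's n <= 0 base case becomes n = 0).
def findT2Go (t1 : Int) (ts : List Int) (l : Int) (n : Nat) : Int :=
  match n with
  | 0 => l
  | Nat.succ k =>
    let half := (k + 1) / 2
    if PySem.List.pyGetD ts (l + (half : Int)) 0 ≥ t1 - 300 then
      findT2Go t1 ts l half
    else
      findT2Go t1 ts (l + (half : Int) + 1) (k + 1 - half - 1)
termination_by n
decreasing_by
  · omega
  · omega

def findT2_alt (t1 : Int) (ts : List Int) : Int :=
  findT2Go t1 ts 0 (ts.length - 1)

-- ===== PRECONDITION & SPEC =====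
def Spec_findT2 (t1 : Int) (ts : List Int) (out : Int) : Prop := out = findT2_alt t1 ts
instance (t1 : Int) (ts : List Int) (out : Int) : Decidable (Spec_findT2 t1 ts out) := by unfold Spec_findT2; infer_instance

-- ===== CLAIM (what is proved, stated in full; the proofs are below) =====
def Claim_equal_findT2 : Prop := ∀ (t1 : Int) (ts : List Int), Dom_findT2 t1 ts → Spec_findT2 t1 ts (findT2 t1 ts)

-- ===== LEMMAS AND PROOFS =====
theorem findT2Loop_eq_go (t1 : Int) (ts : List Int) (l r : Int) :
    findT2Loop t1 ts l r = findT2Go t1 ts l (r - l).toNat := by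
  by_cases h : l < r
  · rw [findT2Loop, dif_pos h]
    obtain ⟨k, hk⟩ : ∃ k, (r - l).toNat = k + 1 := ⟨(r - l).toNat - 1, by omega⟩
    rw [hk, findT2Go]
    have hfd : PySem.Int.floordiv (r - l) 2 = (((k + 1) / 2 : Nat) : Int) := by
      rw [PySem.Int.floordiv_eq_ediv_of_pos (by norm_num : (0:Int) < 2)]
      omega
    dsimp only
    rw [hfd]
    split_ifs with h2
    · rw [findT2Loop_eq_go]
      congr 1
      omega
    · rw [findT2Loop_eq_go]
      congr 1
      omega
  · rw [findT2Loop, dif_neg h]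
    have : (r - l).toNat = 0 := by omega
    rw [this, findT2Go]
termination_by (r - l).toNat
decreasing_by
  all_goals omega

-- ===== VERDICT (by name: the statement is the Claim_ definition above) =====
theorem findT2_spec : Claim_equal_findT2 := by
  intro t1 ts _
  unfold Spec_findT2 findT2 findT2_alt
  rw [findT2Loop_eq_go]
  congr 1
  omega
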